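-- pv_equiv track=rewrite | github.com/jinjinghu-official/-snmp-ai- | SNMP告警监控/snmp_monitor_gui.py | _parse_length
-- ===== SOURCE A (Python) =====
-- def _parse_length(data, pos):
--     if pos >= len(data):
--         return 0, pos
--     b = data[pos]
--     if b < 0x80:
--         return b, pos + 1
--     num_bytes = b & 0x7F
--     length = 0
--     for i in range(num_bytes):
--         if pos + 1 + i >= len(data):
--             break
--         length = (length << 8) | data[pos + 1 + i]
--     return length, pos + 1 + num_bytes
-- ===== SOURCE B (Python) =====
-- def _parse_length(data, pos):
--     n = len(data)
--     if pos >= n: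
--         return 0, pos
--     b = data[pos]
--     if b < 0x80:
--         return b, pos + 1
--     num_bytes = b & 0x7F
--     end = min(pos + 1 + num_bytes, n)
--     chunk = bytes(data[j] for j in range(pos + 1, end))
--     return int.from_bytes(chunk, 'big'), pos + 1 + num_bytes
-- ===== Notes on version B (the rewrite author's own statement) =====
-- stated objective: idiomatic
-- what changed: Replaces the manual per-iteration bounds-checked (length<<8)|byte accumulation loop with a single closed-form int.from_bytes over the clipped index range; Pre_ restricts long-form length bytes to the byte range 0..255, on which A still returns a bit-or accumulation but B's bytes() raises ValueError, and excludes pos < -len(data), where A raises IndexError.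
-- outside the precondition, e.g. on _parse_length([129, 300], 0): A returns (300, 2), B raises ValueError
import Mathlib
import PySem

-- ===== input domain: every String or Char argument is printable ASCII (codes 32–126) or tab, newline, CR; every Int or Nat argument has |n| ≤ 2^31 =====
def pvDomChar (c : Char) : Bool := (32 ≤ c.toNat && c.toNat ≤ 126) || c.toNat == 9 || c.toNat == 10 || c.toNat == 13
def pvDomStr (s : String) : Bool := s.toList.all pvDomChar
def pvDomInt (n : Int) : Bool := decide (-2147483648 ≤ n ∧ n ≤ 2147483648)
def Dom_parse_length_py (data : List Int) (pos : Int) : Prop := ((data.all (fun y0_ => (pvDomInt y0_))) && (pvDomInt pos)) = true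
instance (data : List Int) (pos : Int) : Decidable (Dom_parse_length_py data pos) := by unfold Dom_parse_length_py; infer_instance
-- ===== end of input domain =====

-- B replaces A's per-iteration bounds-checked shift-or accumulation loop with a clipped index
-- range and a single big-endian int.from_bytes (idiomatic); equivalence is proved on Pre_ below.


-- ===== PORT A =====
-- the 'for i in range(num_bytes): if pos+1+i >= len(data): break; length = (length << 8) | data[pos+1+i]' loop
def pvALoop (data : List Int) (pos : Int) : Nat → Int → Int → Int
  | 0, _, length => length
  | Nat.succ k, i, length =>
      if pos + 1 + i ≥ (data.length : Int) then length
      else pvALoop data pos k (i + 1)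
        (PySem.Int.bor (length <<< (8 : Nat)) ((PySem.List.pyGet? data (pos + 1 + i)).getD 0))

def parse_length_py (data : List Int) (pos : Int) : Int × Int :=
  if pos ≥ (data.length : Int) then (0, pos)
  else
    let b := (PySem.List.pyGet? data pos).getD 0   -- data[pos] (getD 0 unreachable inside Pre_)
    if b < 128 then (b, pos + 1)
    else
      let num_bytes := PySem.Int.band b 127
      (pvALoop data pos num_bytes.toNat 0 0, pos + 1 + num_bytes)

-- ===== PORT B =====
-- int.from_bytes(chunk, 'big') on a list of byte values
def pvFromBytesBE (chunk : List Int) : Int :=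
  chunk.foldl (fun acc v => acc * 256 + v) 0

def parse_length_py_alt (data : List Int) (pos : Int) : Int × Int :=
  let n : Int := (data.length : Int)
  if pos ≥ n then (0, pos)
  else
    let b := (PySem.List.pyGet? data pos).getD 0   -- data[pos] (getD 0 unreachable inside Pre_)
    if b < 128 then (b, pos + 1)
    else
      let num_bytes := PySem.Int.band b 127
      let e := min (pos + 1 + num_bytes) n
      let chunk := (PySem.List.pyRange (pos + 1) e 1).map
        (fun j => (PySem.List.pyGet? data j).getD 0)
      (pvFromBytesBE chunk, pos + 1 + num_bytes)

-- ===== PRECONDITION & SPEC =====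
-- Pre_ excludes pos < -len(data) (A raises IndexError) and, on the multi-byte branch, any
-- length byte outside 0..255: there A returns its shift-or accumulation over arbitrary ints
-- but B's bytes() raises ValueError/TypeError, so those inputs are excluded.
def Pre_parse_length_py (data : List Int) (pos : Int) : Prop :=
  -(data.length : Int) ≤ pos ∧
  (pos < (data.length : Int) →
    128 ≤ (PySem.List.pyGet? data pos).getD 0 →
    ∀ j ∈ PySem.List.pyRange (pos + 1)
        (min (pos + 1 + PySem.Int.band ((PySem.List.pyGet? data pos).getD 0) 127)
             (data.length : Int)) 1,
      0 ≤ (PySem.List.pyGet? data j).getD 0 ∧ (PySem.List.pyGet? data j).getD 0 < 256)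
instance (data : List Int) (pos : Int) : Decidable (Pre_parse_length_py data pos) := by
  unfold Pre_parse_length_py; infer_instance

def pvWitness_parse_length_py : List Int × Int := ([130, 1, 2], 0)

def Spec_parse_length_py (data : List Int) (pos : Int) (out : Int × Int) : Prop := out = parse_length_py_alt data pos
instance (data : List Int) (pos : Int) (out : Int × Int) : Decidable (Spec_parse_length_py data pos out) := by unfold Spec_parse_length_py; infer_instance

-- ===== CLAIM (what is proved, stated in full; the proofs are below) =====
def Claim_equal_parse_length_py : Prop := ∀ (data : List Int) (pos : Int), Dom_parse_length_py data pos → Pre_parse_length_py data pos → Spec_parse_length_py data pos (parse_length_py data pos)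

-- ===== LEMMAS AND PROOFS =====

-- (acc << 8) | v is acc * 256 + v for a byte v and nonnegative acc
lemma pv_bor_shift (a v : Int) (ha : 0 ≤ a) (h0 : 0 ≤ v) (h1 : v < 256) :
    PySem.Int.bor (a <<< (8 : Nat)) v = a * 256 + v := by
  lift a to ℕ using ha with m
  lift v to ℕ using h0 with w
  have hw : w < 256 := by exact_mod_cast h1
  have hsh : ((m : Int) <<< (8 : Nat)) = ((m <<< 8 : Nat) : Int) := by
    rw [← Int.shiftLeft_natCast_right, Int.shiftLeft_natCast]
  rw [hsh, PySem.Int.bor_of_nonneg (by positivity) (by positivity)]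
  have hnat : (m <<< 8) ||| w = 2 ^ 8 * m + w := by
    rw [Nat.shiftLeft_eq]
    apply Nat.eq_of_testBit_eq
    intro j
    rw [Nat.testBit_or, Nat.testBit_mul_two_pow,
        Nat.testBit_two_pow_mul_add m (show w < 2 ^ 8 from by omega) j]
    by_cases hj : j < 8
    · simp [hj, show ¬ (8 ≤ j) from by omega]
    · have h2j : (2 : Nat) ^ 8 ≤ 2 ^ j := Nat.pow_le_pow_right (by norm_num) (by omega)
      have hwj : w.testBit j = false :=
        Nat.testBit_lt_two_pow (lt_of_lt_of_le (show w < 2 ^ 8 from by omega) h2j)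
      simp [hj, show 8 ≤ j from by omega, hwj]
  simp only [Int.toNat_natCast]
  rw [hnat]
  push_cast
  ring

-- the break-checked shift-or loop equals a *256+· fold over the clipped index range
lemma pvALoop_eq_fold (data : List Int) (pos : Int) :
    ∀ (k : Nat) (i acc : Int), 0 ≤ acc →
    (∀ j ∈ PySem.List.pyRange (pos + 1 + i) (min (pos + 1 + i + (k : Int)) (data.length : Int)) 1,
        0 ≤ (PySem.List.pyGet? data j).getD 0 ∧ (PySem.List.pyGet? data j).getD 0 < 256) →
    pvALoop data pos k i acc =
      ((PySem.List.pyRange (pos + 1 + i) (min (pos + 1 + i + (k : Int)) (data.length : Int)) 1).map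
          (fun j => (PySem.List.pyGet? data j).getD 0)).foldl (fun a v => a * 256 + v) acc := by
  intro k
  induction k with
  | zero =>
      intro i acc _ _
      rw [PySem.List.pyRange_one_eq_nil (by omega : min (pos + 1 + i + ((0 : Nat) : Int)) (data.length : Int) ≤ pos + 1 + i)]
      simp [pvALoop]
  | succ k ih =>
      intro i acc hacc H
      by_cases hbr : pos + 1 + i ≥ (data.length : Int)
      · rw [PySem.List.pyRange_one_eq_nil (by omega : min (pos + 1 + i + ((k + 1 : Nat) : Int)) (data.length : Int) ≤ pos + 1 + i)]
        simp [pvALoop, hbr]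
      · have hlt : pos + 1 + i < min (pos + 1 + i + ((k + 1 : Nat) : Int)) (data.length : Int) := by
          push_cast; omega
        have hbyte := H (pos + 1 + i) (by rw [PySem.List.mem_pyRange_one]; omega)
        have hrw : PySem.List.pyRange (pos + 1 + i) (min (pos + 1 + i + ((k + 1 : Nat) : Int)) (data.length : Int)) 1
            = (pos + 1 + i) :: PySem.List.pyRange (pos + 1 + i + 1) (min (pos + 1 + i + ((k + 1 : Nat) : Int)) (data.length : Int)) 1 :=
          PySem.List.pyRange_one_cons hlt
        have hstop : min (pos + 1 + i + ((k + 1 : Nat) : Int)) (data.length : Int)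
            = min (pos + 1 + (i + 1) + ((k : Nat) : Int)) (data.length : Int) := by
          push_cast; ring_nf
        have hrec := ih (i + 1) (acc * 256 + (PySem.List.pyGet? data (pos + 1 + i)).getD 0)
          (by have := hbyte.1; positivity)
          (by intro j hj
              apply H
              rw [PySem.List.mem_pyRange_one] at hj ⊢
              rw [hstop]
              omega)
        simp only [pvALoop, hbr]
        rw [pv_bor_shift acc _ hacc hbyte.1 hbyte.2, hrec, hrw]
        simp only [List.map_cons, List.foldl_cons]
        rw [hstop]
        have h3 : pos + 1 + i + 1 = pos + 1 + (i + 1) := by ring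
        rw [h3]
        simp

-- ===== VERDICT (by name: the statement is the Claim_ definition above) =====
theorem parse_length_py_spec : Claim_equal_parse_length_py := by
  intro data pos _ hpre
  unfold Spec_parse_length_py parse_length_py parse_length_py_alt
  by_cases h1 : pos ≥ (data.length : Int)
  · simp [h1]
  · simp only [h1]
    by_cases h2 : (PySem.List.pyGet? data pos).getD 0 < 128
    · simp [h2]
    · simp only [h2]
      have hb : 128 ≤ (PySem.List.pyGet? data pos).getD 0 := by omega
      have hnb0 : 0 ≤ PySem.Int.band ((PySem.List.pyGet? data pos).getD 0) 127 :=
        PySem.Int.band_nonneg_of_nonneg_left 127 (by omega)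
      have hcast : ((PySem.Int.band ((PySem.List.pyGet? data pos).getD 0) 127).toNat : Int)
          = PySem.Int.band ((PySem.List.pyGet? data pos).getD 0) 127 :=
        Int.toNat_of_nonneg hnb0
      have H := hpre.2 (by omega) hb
      have hmain := pvALoop_eq_fold data pos
        (PySem.Int.band ((PySem.List.pyGet? data pos).getD 0) 127).toNat 0 0 le_rfl
        (by intro j hj
            apply H
            rw [PySem.List.mem_pyRange_one] at hj ⊢
            rw [hcast] at hj
            omega)
      rw [hcast] at hmain
      simp only [add_zero] at hmain
      unfold pvFromBytesBE
      rw [hmain]
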